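-- pv_equiv track=rewrite | github.com/jorzel/codefights | bots/proCategorization.py | proCategorization
-- ===== SOURCE A (Python) =====
-- def proCategorization(pros, preferences):
--     pref_dict = {}
--     for p, pref_record in zip(pros, preferences):
--         for z in pref_record:
--             if z not in pref_dict:
--                 pref_dict[z] = []
--             pref_dict[z].append(p)
--     return [[[el[0]], el[1]] for el in sorted(pref_dict.items())]
-- ===== SOURCE B (Python) =====
-- def proCategorization(pros, preferences):
--     pairs = [(z, p) for p, rec in zip(pros, preferences) for z in rec]
--     return [[[k], [p for z, p in pairs if z == k]]
--             for k in sorted({z for z, _ in pairs})]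
-- ===== Notes on version B (the rewrite author's own statement) =====
-- stated objective: alternative
-- what changed: Replaces A's incremental dict-of-lists build followed by sorting the items with a flat (preference, pro) pair list from which the distinct preferences are sorted and each group is collected by a per-key scan; no dict is used.
import Mathlib
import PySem

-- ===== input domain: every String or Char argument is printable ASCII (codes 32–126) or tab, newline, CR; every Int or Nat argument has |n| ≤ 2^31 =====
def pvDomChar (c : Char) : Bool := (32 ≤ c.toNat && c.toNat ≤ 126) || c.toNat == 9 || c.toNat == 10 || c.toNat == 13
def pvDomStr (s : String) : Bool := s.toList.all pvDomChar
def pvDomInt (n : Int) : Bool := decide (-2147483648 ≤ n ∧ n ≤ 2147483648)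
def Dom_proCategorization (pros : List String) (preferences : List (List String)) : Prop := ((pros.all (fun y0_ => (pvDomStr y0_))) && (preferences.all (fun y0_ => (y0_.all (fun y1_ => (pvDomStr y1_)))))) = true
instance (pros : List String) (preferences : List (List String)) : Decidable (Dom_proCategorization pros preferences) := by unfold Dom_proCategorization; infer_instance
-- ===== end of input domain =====

-- B replaces A's incremental dict-of-lists build + item sort with a flat pair list,
-- sorted distinct keys and a per-key scan (objective: alternative decomposition).


-- ===== PORT A =====
def proCategorization (pros : List String) (preferences : List (List String)) : List (List (List String)) :=
  let pref_dict : PySem.Dict String (List String) :=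
    (pros.zip preferences).foldl
      (fun d pr => pr.2.foldl (fun d z => d.modify z [] (· ++ [pr.1])) d)
      PySem.Dict.empty
  (PySem.List.sorted2 pref_dict.items (fun el => el.1) (fun el => el.2) false).map
    (fun el => [[el.1], el.2])

-- ===== PORT B =====
def proCategorization_alt (pros : List String) (preferences : List (List String)) : List (List (List String)) :=
  let pairs : List (String × String) :=
    (pros.zip preferences).flatMap (fun pr => pr.2.map (fun z => (z, pr.1)))
  (PySem.List.sorted (PySem.Set.ofList (pairs.map (fun t => t.1))) (fun x => x) false).map
    (fun k => [[k], (pairs.filter (fun t => t.1 == k)).map (fun t => t.2)])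

-- ===== PRECONDITION & SPEC =====
def Spec_proCategorization (pros : List String) (preferences : List (List String)) (out : List (List (List String))) : Prop := out = proCategorization_alt pros preferences
instance (pros : List String) (preferences : List (List String)) (out : List (List (List String))) : Decidable (Spec_proCategorization pros preferences out) := by unfold Spec_proCategorization; infer_instance

-- ===== CLAIM (what is proved, stated in full; the proofs are below) =====
def Claim_equal_proCategorization : Prop := ∀ (pros : List String) (preferences : List (List String)), Dom_proCategorization pros preferences → Spec_proCategorization pros preferences (proCategorization pros preferences)

-- ===== LEMMAS AND PROOFS =====

-- insertBy only looks at how `before` compares the inserted element with members of the list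
lemma insertBy_congr {α : Type} (b b' : α → α → Bool) (x : α) :
    ∀ (acc : List α), (∀ a ∈ acc, b x a = b' x a) →
      PySem.List.insertBy b x acc = PySem.List.insertBy b' x acc := by
  intro acc
  induction acc with
  | nil => intro _; rfl
  | cons y ys ih =>
    intro h
    simp only [PySem.List.insertBy]
    rw [h y (by simp)]
    by_cases hb : b' x y = true
    · simp [hb]
    · simp only [Bool.not_eq_true] at hb
      simp [hb, ih (fun a ha => h a (by simp [ha]))]

-- a fold of insertBy is insensitive to the comparator on pairs drawn from an invariant set
lemma foldl_insertBy_congr {α : Type} (b b' : α → α → Bool) (P : α → Prop)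
    (hbb : ∀ x a, P x → P a → b x a = b' x a) :
    ∀ (xs acc : List α), (∀ a ∈ acc, P a) → (∀ x ∈ xs, P x) →
      xs.foldl (fun acc x => PySem.List.insertBy b x acc) acc
        = xs.foldl (fun acc x => PySem.List.insertBy b' x acc) acc := by
  intro xs
  induction xs with
  | nil => intro acc _ _; rfl
  | cons x t ih =>
    intro acc hacc hxs
    simp only [List.foldl_cons]
    rw [insertBy_congr b b' x acc (fun a ha => hbb x a (hxs x (by simp)) (hacc a ha))]
    exact ih _ (fun a ha => by
        rcases (PySem.List.mem_insertBy _ _ _ _).1 ha with h | h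
        · exact h ▸ hxs x (by simp)
        · exact hacc a h)
      (fun y hy => hxs y (by simp [hy]))

-- with pairwise-distinct k1 keys, Python's tuple-key sort is the k1-key sort
lemma sorted2_eq_sorted_of_inj {α κ₁ κ₂ : Type} [LT κ₁] [DecidableLT κ₁] [LT κ₂] [DecidableLT κ₂]
    (xs : List α) (k1 : α → κ₁) (k2 : α → κ₂)
    (htri : ∀ p q : κ₁, ¬ p < q → ¬ q < p → p = q)
    (hirr : ∀ b : κ₂, ¬ b < b)
    (hinj : ∀ x ∈ xs, ∀ a ∈ xs, k1 x = k1 a → x = a) :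
    PySem.List.sorted2 xs k1 k2 false = PySem.List.sorted xs k1 false := by
  rw [PySem.List.sorted_eq_foldl_insertBy]
  simp only [PySem.List.sorted2]
  refine foldl_insertBy_congr _ _ (· ∈ xs) ?_ xs [] (by simp) (fun x hx => hx)
  intro x a hx ha
  by_cases h1 : k1 x < k1 a
  · simp [decide_eq_true h1]
  · by_cases h2 : k1 a < k1 x
    · simp [decide_eq_false h1, decide_eq_true h2]
    · have hxa : x = a := hinj x hx a ha (htri _ _ h1 h2)
      subst hxa
      simp [decide_eq_false h1, decide_eq_false (hirr (k2 x))]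

-- ===== VERDICT (by name: the statement is the Claim_ definition above) =====
theorem proCategorization_spec : Claim_equal_proCategorization := by
  intro pros preferences _
  unfold Spec_proCategorization proCategorization proCategorization_alt
  simp only []
  set L : List (String × String) :=
    (pros.zip preferences).flatMap (fun pr => pr.2.map (fun z => (z, pr.1))) with hL
  set S : List String := PySem.Set.ofList (L.map (fun t => t.1)) with hS
  set G : String → List String := fun k => (L.filter (fun t => t.1 == k)).map (fun t => t.2) with hG
  -- the nested dict-building loop is a single fold over the flat pair list L
  have hd : (pros.zip preferences).foldl
      (fun d pr => pr.2.foldl (fun d z => d.modify z [] (· ++ [pr.1])) d)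
      (PySem.Dict.empty : PySem.Dict String (List String))
      = L.foldl (fun d t => d.modify t.1 [] (· ++ [t.2])) PySem.Dict.empty := by
    rw [hL, List.foldl_flatMap]
    simp only [List.foldl_map]
  rw [hd]
  set d : PySem.Dict String (List String) :=
    L.foldl (fun d t => d.modify t.1 [] (· ++ [t.2])) PySem.Dict.empty with hdd
  have hkeys : d.keys = S := by
    rw [hdd, PySem.Dict.keys_foldl_modify_key]
    simp [PySem.Set.update, PySem.Set.ofList_eq_foldl, hS]
  have hnd : d.keys.Nodup := by
    rw [hkeys, hS]; exact PySem.Set.nodup_ofList _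
  have hitems : d.items = S.map (fun k => (k, G k)) := by
    rw [PySem.Dict.items_eq_map_keys d hnd [], hkeys]
    refine List.map_congr_left (fun k _ => ?_)
    rw [hdd, PySem.Dict.getD_foldl_modify_append]
    simp [hG]
  -- items have pairwise-distinct first components
  have hinj : ∀ x ∈ d.items, ∀ a ∈ d.items, x.1 = a.1 → x = a := by
    intro x hx a ha h1
    rw [hitems] at hx ha
    obtain ⟨kx, hkx, rfl⟩ := List.mem_map.1 hx
    obtain ⟨ka, hka, rfl⟩ := List.mem_map.1 ha
    simp only at h1
    rw [h1]
  have htri : ∀ p q : String, ¬ p < q → ¬ q < p → p = q :=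
    fun p q h h' => le_antisymm (not_lt.mp h') (not_lt.mp h)
  have hirr : ∀ b : List String, ¬ b < b := fun b => List.lt_irrefl b
  rw [sorted2_eq_sorted_of_inj d.items (fun el => el.1) (fun el => el.2) htri hirr hinj]
  -- the k1-sort of the items is the sorted key list zipped with its groups
  have hsorted : PySem.List.sorted d.items (fun el => el.1) false
      = (PySem.List.sorted S (fun x => x) false).map (fun k => (k, G k)) := by
    refine PySem.List.sorted_eq_of_perm_of_pairwise_lt (κ := String) _ _ _ ?_ ?_
    · rw [hitems]
      exact (PySem.List.sorted_perm _ _ _).map _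
    · rw [List.pairwise_map]
      exact PySem.List.sorted_ofList_pairwise_lt (L.map (fun t => t.1))
  rw [hsorted, List.map_map]
  rfl
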